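-- pv_equiv track=rewrite | github.com/sandy85625/python-learnings | file.py | count_file_stats
-- ===== SOURCE A (Python) =====
-- import string
--
-- def count_file_stats(contents):
--     lines = contents.count('\n')
--     words = len(contents.split())
--     chars = len(contents)
--     digits = sum(c.isdigit() for c in contents)
--     spaces = sum(c.isspace() for c in contents)
--     specials = sum(c in string.punctuation for c in contents)
--
--     return lines, words, chars, digits, spaces, specials
-- ===== SOURCE B (Python) =====
-- import string
--
-- def count_file_stats(contents):
--     lines = words = chars = digits = spaces = specials = 0
--     in_word = False
--     for c in contents:
--         chars += 1
--         if c == '\n':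
--             lines += 1
--         if c.isspace():
--             spaces += 1
--             in_word = False
--         else:
--             if not in_word:
--                 words += 1
--             in_word = True
--             if c.isdigit():
--                 digits += 1
--             if c in string.punctuation:
--                 specials += 1
--     return lines, words, chars, digits, spaces, specials
-- ===== Notes on version B (the rewrite author's own statement) =====
-- stated objective: alternative
-- what changed: Replaced A's six independent passes (count, split, len, and three generator sums) by one stateful loop over the characters that maintains all six counters at once, counting words with an explicit in_word boundary flag instead of len(split()).
import Mathlib
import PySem

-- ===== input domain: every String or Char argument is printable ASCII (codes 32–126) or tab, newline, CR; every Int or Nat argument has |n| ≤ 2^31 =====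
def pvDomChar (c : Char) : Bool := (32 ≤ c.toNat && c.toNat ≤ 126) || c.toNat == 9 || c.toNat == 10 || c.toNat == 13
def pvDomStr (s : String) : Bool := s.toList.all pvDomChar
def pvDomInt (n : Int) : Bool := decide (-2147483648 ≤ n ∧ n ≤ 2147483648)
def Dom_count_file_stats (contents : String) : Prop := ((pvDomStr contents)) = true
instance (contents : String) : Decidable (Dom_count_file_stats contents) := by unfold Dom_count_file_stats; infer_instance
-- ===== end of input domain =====

-- B fuses A's six independent passes into ONE stateful traversal with an explicit
-- in_word word-boundary flag replacing len(split()); same O(n), alternative decomposition.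

-- string.punctuation (shared constant, used by both ports for `c in string.punctuation`)
def pvPunct : List Char := "!\"#$%&'()*+,-./:;<=>?@[\\]^_`{|}~".toList

-- ===== PORT A =====
def count_file_stats (contents : String) : Int × Int × Int × Int × Int × Int :=
  let cs := contents.toList
  let lines : Int := (PySem.Chars.count cs ['\n'] : Int)           -- contents.count('\n')
  let words : Int := ((PySem.Chars.split₀ cs).length : Int)        -- len(contents.split())
  let chars : Int := (PySem.Chars.len cs : Int)                    -- len(contents)
  let digits : Int := (cs.map (fun c => if PySem.Chars.isdigit c then (1 : Int) else 0)).sum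
  let spaces : Int := (cs.map (fun c => if PySem.Chars.isspace c then (1 : Int) else 0)).sum
  let specials : Int := (cs.map (fun c => if c ∈ pvPunct then (1 : Int) else 0)).sum
  (lines, words, chars, digits, spaces, specials)

-- ===== PORT B =====
-- loop body of B's single for-loop; state = (lines, words, chars, digits, spaces, specials, in_word)
def pvStep (st : Int × Int × Int × Int × Int × Int × Bool) (c : Char) :
    Int × Int × Int × Int × Int × Int × Bool :=
  let (lines, words, chars, digits, spaces, specials, inW) := st
  let chars := chars + 1
  let lines := if c = '\n' then lines + 1 else lines
  if PySem.Chars.isspace c then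
    (lines, words, chars, digits, spaces + 1, specials, false)
  else
    let words := if inW then words else words + 1
    let digits := if PySem.Chars.isdigit c then digits + 1 else digits
    let specials := if c ∈ pvPunct then specials + 1 else specials
    (lines, words, chars, digits, spaces, specials, true)

def count_file_stats_alt (contents : String) : Int × Int × Int × Int × Int × Int :=
  let r := contents.toList.foldl pvStep (0, 0, 0, 0, 0, 0, false)
  (r.1, r.2.1, r.2.2.1, r.2.2.2.1, r.2.2.2.2.1, r.2.2.2.2.2.1)

-- ===== PRECONDITION & SPEC =====
def Spec_count_file_stats (contents : String) (out : Int × Int × Int × Int × Int × Int) : Prop := out = count_file_stats_alt contents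
instance (contents : String) (out : Int × Int × Int × Int × Int × Int) : Decidable (Spec_count_file_stats contents out) := by unfold Spec_count_file_stats; infer_instance

-- ===== CLAIM (what is proved, stated in full; the proofs are below) =====
def Claim_equal_count_file_stats : Prop := ∀ (contents : String), Dom_count_file_stats contents → Spec_count_file_stats contents (count_file_stats contents)

-- ===== LEMMAS AND PROOFS =====

-- number of word starts in cs, given whether we are currently inside a word
def pvW (cs : List Char) (inW : Bool) : Nat :=
  match cs with
  | [] => 0
  | c :: r => if PySem.Chars.isspace c then pvW r false
              else (if inW then 0 else 1) + pvW r true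

-- final value of the in_word flag
def pvWEnd (cs : List Char) (inW : Bool) : Bool :=
  match cs with
  | [] => inW
  | c :: r => pvWEnd r (!PySem.Chars.isspace c)

theorem pv_count_go_singleton (ch : Char) (cs : List Char) (fuel acc : Nat)
    (h : cs.length ≤ fuel) :
    PySem.Chars.count.go [ch] fuel cs acc = acc + cs.count ch := by
  induction cs generalizing fuel acc with
  | nil => cases fuel <;> simp [PySem.Chars.count.go]
  | cons c r ih =>
    cases fuel with
    | zero => simp at h
    | succ n =>
      simp only [List.length_cons, Nat.succ_le_succ_iff] at h
      by_cases hc : ch = c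
      · subst hc
        simp [PySem.Chars.count.go, List.isPrefixOf, ih n (acc + 1) h]
        omega
      · have : List.isPrefixOf [ch] (c :: r) = false := by
          simp [List.isPrefixOf]; exact fun hh => (hc hh).elim
        simp [PySem.Chars.count.go, this, ih n acc h, List.count_cons]
        exact fun hh => hc hh.symm

theorem pv_count_singleton (ch : Char) (cs : List Char) :
    PySem.Chars.count cs [ch] = cs.count ch := by
  simp [PySem.Chars.count, pv_count_go_singleton ch cs cs.length 0 le_rfl]

theorem pv_split₀_go_length (cs : List Char) (cur : List Char) (acc : List (List Char)) :
    (PySem.Chars.split₀.go cs cur acc).length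
      = acc.length + (if cur.isEmpty then 0 else 1) + pvW cs (!cur.isEmpty) := by
  induction cs generalizing cur acc with
  | nil => cases cur <;> simp [PySem.Chars.split₀.go, pvW]
  | cons c r ih =>
    by_cases hs : PySem.Chars.isspace c
    · cases cur with
      | nil => simp [PySem.Chars.split₀.go, hs, ih, pvW]
      | cons a t => simp [PySem.Chars.split₀.go, hs, ih, pvW]
    · cases cur with
      | nil => simp [PySem.Chars.split₀.go, hs, ih, pvW]; omega
      | cons a t => simp [PySem.Chars.split₀.go, hs, ih, pvW]

theorem pv_split₀_length (cs : List Char) :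
    (PySem.Chars.split₀ cs).length = pvW cs false := by
  simpa using pv_split₀_go_length cs [] []

theorem pv_sum_mem (cs : List Char) :
    (cs.map (fun c => if c ∈ pvPunct then (1 : Int) else 0)).sum
      = (cs.countP (fun c => decide (c ∈ pvPunct)) : Int) := by
  simpa using PySem.List.sum_map_ite_one_zero (fun c => decide (c ∈ pvPunct)) cs

theorem pv_space_not_digit (c : Char) (h : PySem.Chars.isspace c = true) :
    PySem.Chars.isdigit c = false := by
  simp only [PySem.Chars.isspace, Bool.or_eq_true, Bool.and_eq_true, decide_eq_true_eq] at h
  simp only [PySem.Chars.isdigit, Bool.and_eq_false_iff, decide_eq_false_iff_not,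
    show (('0' ≤ c) ↔ 48 ≤ c.toNat) from ⟨fun hh => hh, fun hh => hh⟩,
    show ((c ≤ '9') ↔ c.toNat ≤ 57) from ⟨fun hh => hh, fun hh => hh⟩]
  omega

set_option maxRecDepth 2048 in
theorem pv_punct_all_not_space : pvPunct.all (fun c => !PySem.Chars.isspace c) = true := by rfl

theorem pv_punct_not_space : ∀ c ∈ pvPunct, PySem.Chars.isspace c = false := by
  have h := pv_punct_all_not_space
  simp only [List.all_eq_true, Bool.not_eq_true'] at h
  exact h

theorem pv_foldl_step (cs : List Char) (l w ch d sp spc : Int) (inW : Bool) :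
    cs.foldl pvStep (l, w, ch, d, sp, spc, inW)
      = (l + cs.count '\n', w + pvW cs inW, ch + cs.length,
         d + cs.countP (fun c => PySem.Chars.isdigit c),
         sp + cs.countP (fun c => PySem.Chars.isspace c),
         spc + cs.countP (fun c => decide (c ∈ pvPunct)),
         pvWEnd cs inW) := by
  induction cs generalizing l w ch d sp spc inW with
  | nil => simp [pvW, pvWEnd]
  | cons c r ih =>
    simp only [List.foldl_cons, pvStep]
    by_cases hs : PySem.Chars.isspace c
    · have h1 := pv_space_not_digit c hs
      have h2 : c ∉ pvPunct := fun hm => by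
        have h3 := pv_punct_not_space c hm
        rw [hs] at h3
        exact Bool.false_ne_true h3.symm
      simp only [hs, if_true, ih, pvW, pvWEnd, List.count_cons, List.countP_cons]
      by_cases hn : c = '\n' <;> simp [hn, h1, h2] <;> push_cast <;> ring_nf <;>
        first | trivial | (constructor <;> first | ring | trivial)
    · have hd : c ≠ '\n' := by
        intro hh; subst hh; simp [PySem.Chars.isspace] at hs
      simp only [hs, ih, pvW, pvWEnd, List.count_cons, List.countP_cons]
      by_cases hw : inW <;> by_cases hdg : PySem.Chars.isdigit c <;>
        by_cases hp : c ∈ pvPunct <;>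
        simp [hw, hdg, hp, hd] <;> push_cast <;> ring_nf <;>
        first | trivial | (constructor <;> first | ring | trivial)

-- ===== VERDICT (by name: the statement is the Claim_ definition above) =====
theorem count_file_stats_spec : Claim_equal_count_file_stats := by
  intro contents _
  unfold Spec_count_file_stats count_file_stats count_file_stats_alt
  simp only [pv_foldl_step, pv_count_singleton, pv_split₀_length,
    PySem.List.sum_map_ite_one_zero, pv_sum_mem, PySem.Chars.len]
  norm_num
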